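-- pv_equiv track=rewrite | github.com/Dejavu666/pokerThief | hands.py | one_pair_finder
-- ===== SOURCE A (Python) =====
-- def one_pair_finder(hand):
--     ranks = [card[0] for card in hand]
--     highcards = []
--     pairsof2 = []
--     for rank in ranks:
--         if ranks.count(rank) == 1:
--             highcards.append(rank)
--         elif ranks.count(rank) == 2:
--             pairsof2.append(rank)
--     if len(pairsof2) >=1:
--         return [max(pairsof2)]+sorted(highcards,reverse=True)
--     else:
--         return None
-- ===== SOURCE B (Python) =====
-- def one_pair_finder(hand):
--     # Sort the ranks, then scan once grouping equal runs: a run of length 1 is a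
--     # high card, a run of length 2 is a pair (longer runs are ignored, as in A).
--     # Because the scan goes in ascending order, the last pair found is the max
--     # pair and the reversed highcard list is already sorted descending.
--     ranks = sorted(card[0] for card in hand)
--     highcards = []
--     pairs = []
--     i = 0
--     n = len(ranks)
--     while i < n:
--         j = i + 1
--         while j < n and ranks[j] == ranks[i]:
--             j += 1
--         if j - i == 1:
--             highcards.append(ranks[i])
--         elif j - i == 2:
--             pairs.append(ranks[i])
--         i = j
--     if pairs:
--         return [pairs[-1]] + highcards[::-1]
--     return None
-- ===== Notes on version B (the rewrite author's own statement) =====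
-- stated objective: faster
-- what changed: B sorts the ranks once and classifies maximal equal runs in a single ascending scan (run length 1 = high card, 2 = pair), taking the last pair as the max and the reversed highcard list as the descending sort, instead of A's per-card loop that rescans the whole list with .count and then calls max and sorted.
import Mathlib
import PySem

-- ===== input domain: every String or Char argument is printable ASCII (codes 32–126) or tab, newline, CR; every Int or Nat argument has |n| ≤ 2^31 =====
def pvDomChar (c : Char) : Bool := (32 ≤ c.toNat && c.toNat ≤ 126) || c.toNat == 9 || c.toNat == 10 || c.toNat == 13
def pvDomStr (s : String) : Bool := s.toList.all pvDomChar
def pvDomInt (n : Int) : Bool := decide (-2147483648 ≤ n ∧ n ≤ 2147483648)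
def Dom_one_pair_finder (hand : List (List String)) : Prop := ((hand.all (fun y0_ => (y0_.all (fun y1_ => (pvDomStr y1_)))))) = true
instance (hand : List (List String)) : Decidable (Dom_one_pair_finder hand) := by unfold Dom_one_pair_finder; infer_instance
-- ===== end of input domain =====

-- B sorts the ranks once and classifies maximal equal runs in one ascending scan
-- (run length 1 = high card, 2 = pair; last pair = max, reversed highcards = descending),
-- replacing A's per-card loop that rescans the list with .count; objective: faster.

-- ===== PORT A =====
def one_pair_finder (hand : List (List String)) : Option (List String) :=
  -- card[0]: Pre_ guarantees every card is nonempty, so the "" default of pyGetD is never used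
  let ranks := hand.map (fun card => PySem.List.pyGetD card 0 "")
  let hp := ranks.foldl (fun (hp : List String × List String) rank =>
      if PySem.List.count ranks rank = 1 then (hp.1 ++ [rank], hp.2)
      else if PySem.List.count ranks rank = 2 then (hp.1, hp.2 ++ [rank])
      else hp) ([], [])
  if hp.2.length ≥ 1 then
    match PySem.List.max? hp.2 (fun x => x) with
    | some m => some ([m] ++ PySem.List.sorted hp.1 (fun x => x) true)
    | none => none
  else none

-- ===== PORT B =====
-- inner while loop of Source B: consume the run of elements equal to r, returning
-- (number consumed, remaining suffix)
def pvTakeRun (r : String) : List String → Nat × List String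
  | [] => (0, [])
  | x :: xs => if x = r then ((pvTakeRun r xs).1 + 1, (pvTakeRun r xs).2) else (0, x :: xs)

theorem pvTakeRun_len (r : String) : ∀ xs : List String, (pvTakeRun r xs).2.length ≤ xs.length := by
  intro xs
  induction xs with
  | nil => simp [pvTakeRun]
  | cons x t ih =>
    by_cases h : x = r <;> simp [pvTakeRun, h]
    omega

-- outer while loop of Source B: one iteration per maximal run of the sorted rank list
def pvScan : List String → List String × List String
  | [] => ([], [])
  | r :: xs =>
    let t := pvTakeRun r xs
    let hp := pvScan t.2
    if t.1 + 1 = 1 then (r :: hp.1, hp.2)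
    else if t.1 + 1 = 2 then (hp.1, r :: hp.2)
    else hp
termination_by xs => xs.length
decreasing_by simpa using Nat.lt_succ_of_le (pvTakeRun_len r xs)

def one_pair_finder_alt (hand : List (List String)) : Option (List String) :=
  -- card[0] as in A's port; pairs[-1] = pyGet? _ (-1); highcards[::-1] is reversal
  -- (PySem.List.slice?_none_none_neg_one)
  let ranks := PySem.List.sorted (hand.map (fun card => PySem.List.pyGetD card 0 "")) (fun x => x) false
  let hp := pvScan ranks
  if hp.2 ≠ [] then
    match PySem.List.pyGet? hp.2 (-1) with
    | some m => some ([m] ++ hp.1.reverse)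
    | none => none
  else none

-- ===== PRECONDITION & SPEC =====
-- Pre_ excludes hands containing an empty card (card[0] raises IndexError in both A and B).
def Pre_one_pair_finder (hand : List (List String)) : Prop := ∀ card ∈ hand, card ≠ []
instance (hand : List (List String)) : Decidable (Pre_one_pair_finder hand) := by unfold Pre_one_pair_finder; infer_instance
def pvWitness_one_pair_finder : List (List String) := [["A","s"],["A","h"],["7","d"],["K","c"]]

def Spec_one_pair_finder (hand : List (List String)) (out : Option (List String)) : Prop := out = one_pair_finder_alt hand
instance (hand : List (List String)) (out : Option (List String)) : Decidable (Spec_one_pair_finder hand out) := by unfold Spec_one_pair_finder; infer_instance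

-- ===== CLAIM =====
def Claim_equal_one_pair_finder : Prop := ∀ (hand : List (List String)), Dom_one_pair_finder hand → Pre_one_pair_finder hand → Spec_one_pair_finder hand (one_pair_finder hand)

-- ===== LEMMAS AND PROOFS =====

-- A's loop over all cards is the pair of filters of ranks by count.
theorem loopA (ranks : List String) : ∀ (l : List String) (h0 p0 : List String),
    l.foldl (fun (hp : List String × List String) rank =>
      if PySem.List.count ranks rank = 1 then (hp.1 ++ [rank], hp.2)
      else if PySem.List.count ranks rank = 2 then (hp.1, hp.2 ++ [rank])
      else hp) (h0, p0)
    = (h0 ++ l.filter (fun r => decide (List.count r ranks = 1)),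
       p0 ++ l.filter (fun r => decide (¬ List.count r ranks = 1 ∧ List.count r ranks = 2))) := by
  intro l
  induction l with
  | nil => simp
  | cons x xs ih =>
    intro h0 p0
    simp only [List.foldl_cons, List.filter_cons, PySem.List.count_eq] at ih ⊢
    by_cases h1 : List.count x ranks = 1 <;>
      by_cases h2 : List.count x ranks = 2 <;>
      simp [h1, h2, ih, List.append_assoc]

-- on a tail of a sorted list whose elements are all ≥ r, the inner while loop
-- consumes exactly the copies of r (they form a prefix)
theorem pvTakeRun_spec (r : String) : ∀ (xs : List String), (∀ y ∈ xs, r ≤ y) →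
    List.Pairwise (· ≤ ·) xs →
    pvTakeRun r xs = (xs.count r, xs.filter (fun y => decide (y ≠ r))) := by
  intro xs
  induction xs with
  | nil => simp [pvTakeRun]
  | cons x t ih =>
    intro hge hpw
    by_cases hx : x = r
    · subst hx
      have ht := ih (fun y hy => (List.pairwise_cons.mp hpw).1 y hy) hpw.of_cons
      have hstep : pvTakeRun x (x :: t) = ((pvTakeRun x t).1 + 1, (pvTakeRun x t).2) := by
        simp [pvTakeRun]
      rw [hstep, ht]
      simp [List.count_cons, List.filter_cons]
    · have hnot : ∀ y ∈ x :: t, y ≠ r := by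
        intro y hy he
        rcases List.mem_cons.mp hy with h | h
        · exact hx (by rw [← h, he])
        · have h1 : r ≤ x := hge x (by simp)
          have h2 : x ≤ y := (List.pairwise_cons.mp hpw).1 y h
          exact hx (le_antisymm (by rw [← he]; exact h2) h1)
      have hcnt : (x :: t).count r = 0 := by
        rw [List.count_eq_zero]
        intro hmem
        exact hnot r hmem rfl
      have hfil : (x :: t).filter (fun y => decide (y ≠ r)) = x :: t :=
        List.filter_eq_self.mpr (fun y hy => by simpa using hnot y hy)
      have hstep : pvTakeRun r (x :: t) = (0, x :: t) := by
        simp [pvTakeRun, hx]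
      rw [hstep, hcnt, hfil]

-- characterisation of the outer scan on a sorted list: highcards = the count-1
-- elements in order; pairs = strictly increasing, holding exactly the count-2 values
theorem pvScan_spec : ∀ (n : Nat) (s : List String), s.length ≤ n →
    List.Pairwise (· ≤ ·) s →
    (pvScan s).1 = s.filter (fun y => decide (s.count y = 1)) ∧
    List.Pairwise (· < ·) (pvScan s).2 ∧
    (∀ y, y ∈ (pvScan s).2 ↔ (y ∈ s ∧ s.count y = 2)) := by
  intro n
  induction n with
  | zero =>
    intro s hlen _
    have hs : s = [] := List.eq_nil_of_length_eq_zero (Nat.le_zero.mp hlen)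
    subst hs
    simp [pvScan]
  | succ n ih =>
    intro s hlen hpw
    cases s with
    | nil => simp [pvScan]
    | cons r xs =>
      have hge : ∀ y ∈ xs, r ≤ y := (List.pairwise_cons.mp hpw).1
      have hpxs : List.Pairwise (· ≤ ·) xs := hpw.of_cons
      have htr := pvTakeRun_spec r xs hge hpxs
      set rest := xs.filter (fun y => decide (y ≠ r)) with hrest
      have hsub : rest.Sublist xs := List.filter_sublist
      have hprest : List.Pairwise (· ≤ ·) rest := hpxs.sublist hsub
      have hmemr : ∀ y, y ∈ rest ↔ (y ∈ xs ∧ y ≠ r) := by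
        intro y; simp [hrest, List.mem_filter]
      have hlt : ∀ y ∈ rest, r < y := by
        intro y hy
        obtain ⟨hyx, hyr⟩ := (hmemr y).mp hy
        exact lt_of_le_of_ne (hge y hyx) (fun he => hyr he.symm)
      have hcount : ∀ y, y ≠ r → rest.count y = (r :: xs).count y := by
        intro y hyr
        rw [hrest, List.count_filter (by simpa using hyr), List.count_cons]
        simp [hyr, Ne.symm hyr]
      have hrnot : r ∉ rest := by simp [hrest, List.mem_filter]
      have hlen' : rest.length ≤ n := by
        have := hsub.length_le
        simp at hlen
        omega
      obtain ⟨ihH, ihP, ihM⟩ := ih rest hlen' hprest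
      have hc : (r :: xs).count r = xs.count r + 1 := by simp [List.count_cons]
      -- the s-count-1 filter over xs equals the same filter over rest
      have hq : xs.filter (fun y => decide ((r :: xs).count y = 1)) =
          rest.filter (fun y => decide ((r :: xs).count y = 1)) := by
        by_cases hrx : r ∈ xs
        · rw [hrest, List.filter_filter]
          apply List.filter_congr
          intro y hy
          by_cases hyr : y = r
          · subst hyr
            have h1 : 1 ≤ xs.count y := List.one_le_count_iff.mpr hrx
            have h2 : (decide ((y :: xs).count y = 1)) = false := by
              simp [List.count_cons]
              omega
            simp [h2]
            omega
          · simp [hyr]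
        · have hre : rest = xs := by
            rw [hrest]
            refine List.filter_eq_self.mpr (fun y hy => ?_)
            simp only [decide_eq_true_eq]
            intro he
            exact hrx (he ▸ hy)
          rw [hre]
      -- rest-count filter = s-count filter on rest
      have ihH' : (pvScan rest).1 = rest.filter (fun y => decide ((r :: xs).count y = 1)) := by
        rw [ihH]
        apply List.filter_congr
        intro y hy
        rw [hcount y ((hmemr y).mp hy).2]
      -- membership in the recursive pairs list, for y ≠ r
      have ihM' : ∀ y, y ≠ r → ((y ∈ (pvScan rest).2) ↔ (y ∈ (r :: xs) ∧ (r :: xs).count y = 2)) := by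
        intro y hyr
        rw [ihM, hmemr, hcount y hyr]
        constructor
        · rintro ⟨⟨h1, _⟩, h2⟩
          exact ⟨List.mem_cons_of_mem _ h1, h2⟩
        · rintro ⟨h1, h2⟩
          rcases List.mem_cons.mp h1 with h | h
          · exact absurd h hyr
          · exact ⟨⟨h, hyr⟩, h2⟩
      have hrP : r ∉ (pvScan rest).2 := fun h => hrnot ((ihM r).mp h).1
      -- one step of pvScan
      rw [pvScan, htr]
      simp only
      by_cases h1 : xs.count r + 1 = 1
      · rw [if_pos h1]
        refine ⟨?_, ihP, ?_⟩
        · rw [List.filter_cons]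
          have hd : (decide ((r :: xs).count r = 1)) = true := by simp [hc, h1]
          rw [hd, ihH', ← hq]
          simp
        · intro y
          by_cases hyr : y = r
          · subst hyr
            simp only [hrP, false_iff]
            rintro ⟨_, h2⟩
            rw [hc] at h2
            omega
          · exact ihM' y hyr
      · rw [if_neg h1]
        have hqr : (decide ((r :: xs).count r = 1)) = false := by
          simp [hc]
          omega
        by_cases h2 : xs.count r + 1 = 2
        · rw [if_pos h2]
          refine ⟨?_, ?_, ?_⟩
          · simp only
            rw [List.filter_cons, hqr, ihH', ← hq]
            simp
          · refine List.pairwise_cons.mpr ⟨?_, ihP⟩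
            intro y hy
            exact hlt y ((ihM y).mp hy).1
          · intro y
            simp only [List.mem_cons]
            constructor
            · rintro (he | hy)
              · subst he
                exact ⟨Or.inl rfl, by rw [hc]; omega⟩
              · have hyr : y ≠ r := fun he => hrnot (he ▸ ((ihM y).mp hy).1)
                have h := (ihM' y hyr).mp hy
                exact ⟨List.mem_cons.mp h.1, h.2⟩
            · rintro ⟨hmem, hcnt2⟩
              by_cases hyr : y = r
              · exact Or.inl hyr
              · exact Or.inr ((ihM' y hyr).mpr ⟨List.mem_cons.mpr hmem, hcnt2⟩)
        · rw [if_neg h2]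
          refine ⟨?_, ihP, ?_⟩
          · rw [List.filter_cons, hqr, ihH', ← hq]
            simp
          · intro y
            by_cases hyr : y = r
            · subst hyr
              simp only [hrP, false_iff]
              rintro ⟨_, hcc⟩
              rw [hc] at hcc
              omega
            · exact ihM' y hyr

-- on a (· ≤ ·)-pairwise list every element is ≤ the last one
theorem pairwise_le_getLast : ∀ (l : List String) (h : l ≠ []),
    List.Pairwise (· ≤ ·) l → ∀ y ∈ l, y ≤ l.getLast h := by
  intro l
  induction l with
  | nil => intro h; exact absurd rfl h
  | cons x t ih =>
    intro h hpw y hy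
    cases t with
    | nil =>
      simp at hy
      simp [hy, List.getLast]
    | cons a b =>
      rw [List.getLast_cons (by simp)]
      rcases List.mem_cons.mp hy with he | hyt
      · subst he
        have hmem := List.getLast_mem (l := a :: b) (by simp)
        exact (List.pairwise_cons.mp hpw).1 _ hmem
      · exact ih (by simp) hpw.of_cons y hyt

-- ===== VERDICT =====
theorem one_pair_finder_spec : Claim_equal_one_pair_finder := by
  intro hand _hdom _hpre
  unfold Spec_one_pair_finder one_pair_finder one_pair_finder_alt
  generalize hr : hand.map (fun card => PySem.List.pyGetD card 0 "") = ranks0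
  simp only [loopA ranks0 ranks0, List.nil_append]
  set s := PySem.List.sorted ranks0 (fun x => x) false with hs
  have hperm : s.Perm ranks0 := PySem.List.sorted_perm ranks0 (fun x => x) false
  have hpw : List.Pairwise (· ≤ ·) s := PySem.List.sorted_pairwise ranks0 (fun x => x)
  have hcnt : ∀ y, s.count y = ranks0.count y := fun y => hperm.count_eq y
  obtain ⟨hH, hP, hM⟩ := pvScan_spec s.length s le_rfl hpw
  -- A's pair filter is the plain count-2 filter
  have hpA2 : ranks0.filter (fun r => decide (¬ List.count r ranks0 = 1 ∧ List.count r ranks0 = 2))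
      = ranks0.filter (fun r => decide (List.count r ranks0 = 2)) := by
    apply List.filter_congr
    intro y _
    by_cases h2 : List.count y ranks0 = 2 <;> simp [h2] <;> omega
  rw [hpA2]
  -- membership correspondence between B's pairs and A's pair filter
  have hmem2 : ∀ y, y ∈ (pvScan s).2 ↔ y ∈ ranks0.filter (fun r => decide (List.count r ranks0 = 2)) := by
    intro y
    rw [hM, List.mem_filter, hperm.mem_iff, hcnt]
    simp
  by_cases hne : (pvScan s).2 = []
  · have hA : ranks0.filter (fun r => decide (List.count r ranks0 = 2)) = [] := by
      rw [List.eq_nil_iff_forall_not_mem]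
      intro y hy
      exact (List.eq_nil_iff_forall_not_mem.mp hne y) ((hmem2 y).mpr hy)
    simp [hA, hne]
  · have hAne : ranks0.filter (fun r => decide (List.count r ranks0 = 2)) ≠ [] := by
      intro hA
      apply hne
      rw [List.eq_nil_iff_forall_not_mem]
      intro y hy
      exact (List.eq_nil_iff_forall_not_mem.mp hA y) ((hmem2 y).mp hy)
    have hlenA : (ranks0.filter (fun r => decide (List.count r ranks0 = 2))).length ≥ 1 := by
      cases hF : ranks0.filter (fun r => decide (List.count r ranks0 = 2)) with
      | nil => exact absurd hF hAne
      | cons a t => simp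
    rw [if_pos hlenA, if_pos hne]
    -- A's max
    obtain ⟨m, hm⟩ : ∃ m, PySem.List.max? (ranks0.filter (fun r => decide (List.count r ranks0 = 2))) (fun x => x) = some m := by
      cases hM' : PySem.List.max? (ranks0.filter (fun r => decide (List.count r ranks0 = 2))) (fun x => x) with
      | none => exact absurd ((PySem.List.max?_eq_none_iff _ _).mp hM') hAne
      | some m => exact ⟨m, rfl⟩
    rw [hm]
    -- B's pairs[-1]
    rw [PySem.List.pyGet?_neg_one, List.getLast?_eq_some_getLast hne]
    -- the two heads agree
    have hPle : List.Pairwise (· ≤ ·) (pvScan s).2 := hP.imp le_of_lt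
    have hlast_mem : (pvScan s).2.getLast hne ∈ (pvScan s).2 := List.getLast_mem hne
    have h1 : (pvScan s).2.getLast hne ≤ m :=
      PySem.List.max?_isMax hm _ ((hmem2 _).mp hlast_mem)
    have h2 : m ≤ (pvScan s).2.getLast hne :=
      pairwise_le_getLast _ hne hPle m ((hmem2 m).mpr (PySem.List.max?_mem hm))
    have hmeq : m = (pvScan s).2.getLast hne := le_antisymm h2 h1
    -- the tails agree: descending sort of A's highcards = reverse of B's highcards
    have hpred : (fun y => decide (s.count y = 1)) = (fun r => decide (List.count r ranks0 = 1)) := by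
      funext y
      rw [hcnt y]
    have hHs : (pvScan s).1 = s.filter (fun r => decide (List.count r ranks0 = 1)) := by
      rw [hH, hpred]
    have hfilpw : List.Pairwise (· < ·) (s.filter (fun r => decide (List.count r ranks0 = 1))) := by
      have hle : List.Pairwise (· ≤ ·) (s.filter (fun r => decide (List.count r ranks0 = 1))) :=
        hpw.sublist List.filter_sublist
      have hnd : (s.filter (fun r => decide (List.count r ranks0 = 1))).Nodup := by
        rw [List.nodup_iff_count_le_one]
        intro y
        by_cases hy : List.count y ranks0 = 1
        · rw [List.count_filter (by simp [hy])]
          rw [show List.count y s = List.count y ranks0 from hcnt y, hy]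
        · have hnm : y ∉ s.filter (fun r => decide (List.count r ranks0 = 1)) := by
            simp [List.mem_filter, hy]
          rw [List.count_eq_zero.mpr hnm]
          omega
      exact (hle.and hnd).imp (fun h => lt_of_le_of_ne h.1 h.2)
    have htail : PySem.List.sorted (ranks0.filter (fun r => decide (List.count r ranks0 = 1))) (fun x => x) true
        = (pvScan s).1.reverse := by
      rw [hHs]
      apply PySem.List.sorted_rev_eq_of_perm_of_pairwise_gt
      · exact (List.reverse_perm _).trans (hperm.filter _)
      · rw [List.pairwise_reverse]
        exact hfilpw
    rw [htail, hmeq]
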